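-- pv_equiv track=rewrite | github.com/Demetra0/leetcode | 338_counting_bits.py | countBits
-- ===== SOURCE A (Python) =====
-- from typing import List
--
-- def countBits(n: int) -> List[int]:
--     ans = [0]
--
--     for i in range(1, n + 1):
--         cur = 0
--
--         while i:
--             cur += i % 2
--             i = i >> 1
--
--         ans.append(cur)
--
--     return ans
-- ===== SOURCE B (Python) =====
-- from typing import List
--
-- def countBits(n: int) -> List[int]:
--     ans = [0]
--     for i in range(1, n + 1):
--         ans.append(ans[i >> 1] + i % 2)
--     return ans
-- ===== Notes on version B (the rewrite author's own statement) =====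
-- stated objective: faster
-- what changed: Replaces the inner while-loop that recounts the bits of each number from scratch with a dynamic-programming recurrence reusing the already-computed count of the number's right shift plus its lowest bit.
import Mathlib
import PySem

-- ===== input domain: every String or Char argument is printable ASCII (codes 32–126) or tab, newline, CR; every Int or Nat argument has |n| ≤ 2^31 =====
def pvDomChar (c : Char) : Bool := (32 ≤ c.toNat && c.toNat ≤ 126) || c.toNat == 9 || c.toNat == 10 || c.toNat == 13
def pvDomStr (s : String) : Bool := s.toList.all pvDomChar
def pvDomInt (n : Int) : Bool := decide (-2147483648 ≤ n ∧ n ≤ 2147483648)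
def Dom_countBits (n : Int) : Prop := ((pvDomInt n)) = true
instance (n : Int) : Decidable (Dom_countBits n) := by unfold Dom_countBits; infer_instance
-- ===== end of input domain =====

-- B replaces A's per-element bit-counting while-loop by the DP recurrence ans[i] = ans[i >> 1] + i % 2 (faster: O(n) vs O(n log n)).

-- ===== PORT A =====
-- inner 'while i: cur += i % 2; i = i >> 1' — i is always ≥ 1 here, so carrying it as a Nat is exact
def pvBitSum (i : Nat) (cur : Int) : Int :=
  if i = 0 then cur else pvBitSum (i / 2) (cur + (i % 2 : Int))
decreasing_by exact Nat.div_lt_self (Nat.pos_of_ne_zero (by assumption)) (by omega)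

def countBits (n : Int) : List Int :=
  (PySem.List.pyRange 1 (n + 1) 1).foldl (fun ans i => ans ++ [pvBitSum i.toNat 0]) [0]

-- ===== PORT B =====
def countBits_alt (n : Int) : List Int :=
  (PySem.List.pyRange 1 (n + 1) 1).foldl
    (fun (ans : List Int) (i : Int) => ans ++ [PySem.List.pyGetD ans (i >>> (1:Nat)) 0 + PySem.Int.mod i 2]) [0]

-- ===== PRECONDITION & SPEC =====
def Spec_countBits (n : Int) (out : List Int) : Prop := out = countBits_alt n
instance (n : Int) (out : List Int) : Decidable (Spec_countBits n out) := by unfold Spec_countBits; infer_instance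

-- ===== CLAIM (what is proved, stated in full; the proofs are below) =====
def Claim_equal_countBits : Prop := ∀ (n : Int), Dom_countBits n → Spec_countBits n (countBits n)

-- ===== LEMMAS AND PROOFS =====

theorem pvBitSum_acc (i : Nat) : ∀ cur : Int, pvBitSum i cur = cur + pvBitSum i 0 := by
  induction i using Nat.strong_induction_on with
  | _ i ih =>
    intro cur
    by_cases h : i = 0
    · subst h
      have h0 : pvBitSum 0 0 = 0 := by rw [pvBitSum]; norm_num
      rw [pvBitSum, h0]; norm_num
    · have hlt : i / 2 < i := Nat.div_lt_self (Nat.pos_of_ne_zero h) one_lt_two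
      have e1 : pvBitSum i cur = cur + (i % 2 : Int) + pvBitSum (i / 2) 0 := by
        rw [pvBitSum]; simp only [h, if_false]; exact ih _ hlt _
      have e2 : pvBitSum i 0 = (0:Int) + (i % 2 : Int) + pvBitSum (i / 2) 0 := by
        rw [pvBitSum]; simp only [h, if_false]; exact ih _ hlt _
      rw [e1, e2]; ring

theorem pvBitSum_step (i : Nat) (h : i ≠ 0) :
    pvBitSum i 0 = pvBitSum (i / 2) 0 + (i % 2 : Int) := by
  conv_lhs => rw [pvBitSum]
  simp only [h, if_false]
  rw [pvBitSum_acc]; ring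

theorem countBits_A_eq (m : Nat) :
    countBits (m : Int) = (List.range (m + 1)).map (fun k => pvBitSum k 0) := by
  induction m with
  | zero =>
    have hb0 : pvBitSum 0 0 = 0 := by rw [pvBitSum]; simp
    unfold countBits
    rw [PySem.List.pyRange_one_eq_nil (by omega)]
    simp [hb0]
  | succ m ih =>
    unfold countBits at ih ⊢
    rw [show ((m + 1 : Nat) : Int) + 1 = ((m : Int) + 1) + 1 by push_cast; ring,
        PySem.List.pyRange_one_succ_right (by omega), List.foldl_append, ih,
        List.range_succ (n := m + 1), List.map_append]
    simp only [List.foldl_cons, List.foldl_nil, List.map_cons, List.map_nil,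
      List.append_cancel_left_eq]
    have ht : ((m : Int) + 1).toNat = m + 1 := by omega
    rw [ht]

theorem countBits_B_eq (m : Nat) :
    countBits_alt (m : Int) = (List.range (m + 1)).map (fun k => pvBitSum k 0) := by
  induction m with
  | zero =>
    have hb0 : pvBitSum 0 0 = 0 := by rw [pvBitSum]; simp
    unfold countBits_alt
    rw [PySem.List.pyRange_one_eq_nil (by omega)]
    simp [hb0]
  | succ m ih =>
    unfold countBits_alt at ih ⊢
    rw [show ((m + 1 : Nat) : Int) + 1 = ((m : Int) + 1) + 1 by push_cast; ring,
        PySem.List.pyRange_one_succ_right (by omega), List.foldl_append, ih,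
        List.range_succ (n := m + 1), List.map_append]
    simp only [List.foldl_cons, List.foldl_nil, List.map_cons, List.map_nil,
      List.append_cancel_left_eq]
    have hsh : ((m : Int) + 1) >>> (1:Nat) = (((m + 1) / 2 : Nat) : Int) := by
      rw [show ((m : Int) + 1) = ((m + 1 : Nat) : Int) by push_cast; ring]
      rw [show ((m + 1 : Nat) : Int) >>> (1:Nat) = (((m + 1) >>> 1 : Nat) : Int) from rfl]
      norm_num [Nat.shiftRight_eq_div_pow]
    have hmod : PySem.Int.mod ((m : Int) + 1) 2 = (((m + 1) % 2 : Nat) : Int) := by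
      rw [show ((m : Int) + 1) = ((m + 1 : Nat) : Int) by push_cast; ring]
      exact_mod_cast PySem.Int.mod_natCast (m + 1) 2
    rw [hsh, hmod, PySem.List.pyGetD_natCast, pvBitSum_step (m + 1) (by omega)]
    have hlt : (m + 1) / 2 < m + 1 := Nat.div_lt_self (by omega) (by omega)
    rw [List.getD_eq_getElem?_getD, List.getElem?_map, List.getElem?_range (by omega)]
    simp

-- ===== VERDICT (by name: the statement is the Claim_ definition above) =====
theorem countBits_spec : Claim_equal_countBits := by
  intro n _
  unfold Spec_countBits
  by_cases h : 0 ≤ n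
  · rw [show n = (n.toNat : Int) by omega, countBits_A_eq, countBits_B_eq]
  · unfold countBits countBits_alt
    rw [PySem.List.pyRange_one_eq_nil (by omega)]
    rfl
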